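-- pv_equiv track=rewrite | github.com/Mohit-Chaudhari/Level-Up-Coding | More Problems on Hashing/perfect_cards.py | solve
-- ===== SOURCE A (Python) =====
-- def solve(A):
--     cnd1 = A[0]
--     cnd2 = None
--     cnt1 = 1
--     cnt2 = 0
--     flag = True
--     ln = len(A)
--
--     for i in range(1, ln):
--         if flag:
--             if A[i] != cnd1:
--                 cnd2 = A[i]
--                 flag = False
--         if A[i] == cnd1:
--             cnt1 += 1
--         elif A[i] == cnd2:
--             cnt2 += 1
--
--     if cnt1 == cnt2 and cnt1 + cnt2 == ln:
--         return "WIN"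
--     else:
--         return "LOSE"
-- ===== SOURCE B (Python) =====
-- def solve(A):
--     counts = {}
--     for x in A:
--         counts[x] = counts.get(x, 0) + 1
--     vals = list(counts.values())
--     if len(vals) == 2 and vals[0] == vals[1]:
--         return "WIN"
--     return "LOSE"
-- ===== Notes on version B (the rewrite author's own statement) =====
-- stated objective: simpler
-- what changed: Replaces A's candidate-tracking loop (flag, two tracked candidates, two running counters) with a frequency dictionary built in one pass, answering WIN iff it has exactly two keys with equal counts.
-- outside the precondition, e.g. on solve([]): A raises IndexError, B returns 'LOSE'
import Mathlib
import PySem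

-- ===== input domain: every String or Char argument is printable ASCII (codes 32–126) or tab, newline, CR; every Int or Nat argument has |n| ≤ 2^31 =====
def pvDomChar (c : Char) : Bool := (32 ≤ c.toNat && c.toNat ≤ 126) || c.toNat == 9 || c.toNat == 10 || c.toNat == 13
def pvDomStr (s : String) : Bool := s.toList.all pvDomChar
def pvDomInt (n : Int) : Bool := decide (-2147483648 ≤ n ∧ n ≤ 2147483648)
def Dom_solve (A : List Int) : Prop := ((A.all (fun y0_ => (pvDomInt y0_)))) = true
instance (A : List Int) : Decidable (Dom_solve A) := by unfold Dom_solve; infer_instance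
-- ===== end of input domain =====

-- B replaces A's candidate-tracking flag/loop by a frequency dictionary built in one pass,
-- answering WIN iff it has exactly two keys with equal counts (objective: simpler).


-- ===== PORT A =====
-- one step of A's for-loop; state = (cnd2, cnt1, cnt2, flag)
def stepA (cnd1 : Int) (st : Option Int × Int × Int × Bool) (ai : Int) : Option Int × Int × Int × Bool :=
  let cnd2 := st.1; let cnt1 := st.2.1; let cnt2 := st.2.2.1; let flag := st.2.2.2
  let p : Option Int × Bool :=
    if flag then (if ai ≠ cnd1 then (some ai, false) else (cnd2, flag)) else (cnd2, flag)
  let c : Int × Int :=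
    if ai = cnd1 then (cnt1 + 1, cnt2)
    else if some ai = p.1 then (cnt1, cnt2 + 1)
    else (cnt1, cnt2)
  (p.1, c.1, c.2, p.2)

def solve (A : List Int) : String :=
  match A with
  | [] => ""  -- indexing the first element raises IndexError on the empty list; excluded by Pre_solve
  | cnd1 :: rest =>
    let ln : Int := PySem.List.len A
    let st := rest.foldl (stepA cnd1) ((none : Option Int), (1 : Int), (0 : Int), true)
    if st.2.1 = st.2.2.1 ∧ st.2.1 + st.2.2.1 = ln then "WIN" else "LOSE"

-- ===== PORT B =====
def solve_alt (A : List Int) : String :=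
  let counts : PySem.Dict Int Int := A.foldl (fun d x => d.insert x (d.getD x 0 + 1)) PySem.Dict.empty
  let vals := counts.values
  -- Python's 'and' short-circuits, so vals[0]/vals[1] are only read when len(vals) == 2;
  -- pyGetD is exact there (its default is never returned under the guard)
  if PySem.List.len vals = 2 ∧ PySem.List.pyGetD vals 0 0 = PySem.List.pyGetD vals 1 0 then "WIN" else "LOSE"

-- ===== PRECONDITION & SPEC =====
-- Pre_ excludes only the empty list, on which A raises IndexError indexing the first element.
def Pre_solve (A : List Int) : Prop := A ≠ []
instance (A : List Int) : Decidable (Pre_solve A) := by unfold Pre_solve; infer_instance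
def pvWitness_solve : List Int := ([1, 2, 1, 2])

def Spec_solve (A : List Int) (out : String) : Prop := out = solve_alt A
instance (A : List Int) (out : String) : Decidable (Spec_solve A out) := by unfold Spec_solve; infer_instance

-- ===== CLAIM (what is proved, stated in full; the proofs are below) =====
def Claim_equal_solve : Prop := ∀ (A : List Int), Dom_solve A → Pre_solve A → Spec_solve A (solve A)

-- ===== LEMMAS AND PROOFS =====

-- B's dictionary is Counter(A): its values are the counts of A's distinct elements in first-occurrence order
theorem valsB (A : List Int) :
    (A.foldl (fun d x => d.insert x (d.getD x 0 + 1)) PySem.Dict.empty).values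
      = (PySem.Set.ofList A).map (fun k => (A.count k : Int)) := by
  rw [PySem.Dict.foldl_insert_getD_add_one_eq_counter]
  simp [PySem.Dict.values, PySem.Dict.items_counter]

theorem discard_ofList (l : List Int) (c : Int) :
    PySem.Set.discard (PySem.Set.ofList l) c
      = PySem.Set.ofList (l.filter (fun x => x ≠ c)) := by
  induction l with
  | nil => rfl
  | cons a t ih =>
    rw [PySem.Set.ofList_cons, List.filter_cons]
    by_cases h1 : a = c
    · subst h1
      rw [if_neg (by simp)]
      rw [← ih]
      simp [PySem.Set.discard, List.filter_filter]
    · rw [if_pos (by simp [h1])]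
      rw [PySem.Set.ofList_cons, ← ih]
      simp only [PySem.Set.discard, List.filter_filter, List.filter_cons]
      rw [if_pos (by simp [h1])]
      congr 2
      funext y
      rw [Bool.and_comm]

-- A's loop once the second candidate is fixed: it just counts the two candidates
theorem foldA_false (c1 c2 : Int) (h : c2 ≠ c1) (l : List Int) : ∀ n1 n2 : Int,
    l.foldl (stepA c1) (some c2, n1, n2, false)
      = (some c2, n1 + l.count c1, n2 + l.count c2, false) := by
  induction l with
  | nil => intro n1 n2; simp
  | cons a t ih =>
    intro n1 n2
    simp only [List.foldl_cons, List.count_cons]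
    by_cases h1 : a = c1
    · have hs : stepA c1 (some c2, n1, n2, false) a = (some c2, n1 + 1, n2, false) := by
        simp [stepA, h1]
      subst h1
      rw [hs, ih]
      simp [Ne.symm h]
      push_cast; omega
    · by_cases h2 : a = c2
      · have hs : stepA c1 (some c2, n1, n2, false) a = (some c2, n1, n2 + 1, false) := by
          simp [stepA, h1, h2, h]
        subst h2
        rw [hs, ih]
        simp [h1]
        push_cast; omega
      · have hs : stepA c1 (some c2, n1, n2, false) a = (some c2, n1, n2, false) := by
          simp [stepA, h1, h2, h]
        rw [hs, ih]
        simp [h1, h2]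

-- A's loop from the initial state, characterised by the first element differing from cnd1
theorem foldA_true (c1 : Int) (l : List Int) : ∀ n1 : Int,
    l.foldl (stepA c1) (none, n1, 0, true)
      = match l.filter (fun x => x ≠ c1) with
        | [] => (none, n1 + (l.count c1 : Int), 0, true)
        | c2 :: _ => (some c2, n1 + (l.count c1 : Int), (l.count c2 : Int), false) := by
  induction l with
  | nil => intro n1; simp
  | cons a t ih =>
    intro n1
    simp only [List.foldl_cons]
    by_cases h1 : a = c1
    · subst h1
      have hs : stepA a (none, n1, 0, true) a = (none, n1 + 1, 0, true) := by simp [stepA]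
      have hfc : (a :: t).filter (fun x => decide (x ≠ a)) = t.filter (fun x => decide (x ≠ a)) := by
        simp
      rw [hs, ih, hfc]
      cases hf : t.filter (fun x => decide (x ≠ a)) with
      | nil =>
        simp [List.count_cons]; push_cast; omega
      | cons c2 tl =>
        have hc2 : c2 ≠ a := by
          have : c2 ∈ t.filter (fun x => decide (x ≠ a)) := by rw [hf]; simp
          simpa using (List.mem_filter.mp this).2
        simp [List.count_cons, hc2]
        push_cast; omega
    · have hs : stepA c1 (none, n1, 0, true) a = (some a, n1, 1, false) := by
        simp [stepA, h1]
      rw [hs, foldA_false c1 a h1 t]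
      have hfc : (a :: t).filter (fun x => decide (x ≠ c1)) = a :: t.filter (fun x => decide (x ≠ c1)) := by
        simp [h1]
      rw [hfc]
      simp [List.count_cons, h1]
      push_cast; omega
theorem count_pair_le (c1 c2 : Int) (h : c1 ≠ c2) (A : List Int) :
    A.count c1 + A.count c2 ≤ A.length := by
  induction A with
  | nil => simp
  | cons a t ih =>
    simp only [List.count_cons, List.length_cons]
    by_cases h1 : a = c1 <;> by_cases h2 : a = c2 <;> simp_all <;> omega

theorem count_pair_eq (c1 c2 : Int) (h : c1 ≠ c2) (A : List Int)
    (hall : ∀ x ∈ A, x = c1 ∨ x = c2) :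
    A.count c1 + A.count c2 = A.length := by
  induction A with
  | nil => simp
  | cons a t ih =>
    have ha := hall a (by simp)
    have ht : ∀ x ∈ t, x = c1 ∨ x = c2 := fun x hx => hall x (by simp [hx])
    simp only [List.count_cons, List.length_cons]
    have := ih ht
    rcases ha with rfl | rfl
    · simp [h, Ne.symm h]; omega
    · simp [h, Ne.symm h]; omega

theorem count_pair_lt (c1 c2 c3 : Int) (h12 : c1 ≠ c2) (h13 : c3 ≠ c1) (h23 : c3 ≠ c2)
    (A : List Int) (hmem : c3 ∈ A) :
    A.count c1 + A.count c2 < A.length := by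
  induction A with
  | nil => simp at hmem
  | cons a t ih =>
    simp only [List.count_cons, List.length_cons]
    rcases List.mem_cons.mp hmem with rfl | hm
    · have := count_pair_le c1 c2 h12 t
      simp [Ne.symm h13, Ne.symm h23, h13, h23]
      omega
    · have := ih hm
      by_cases h1 : a = c1 <;> by_cases h2 : a = c2 <;> simp_all <;> omega

theorem foldA_true_nil (c1 : Int) (l : List Int) (h : l.filter (fun x => decide (x ≠ c1)) = []) (n1 : Int) :
    l.foldl (stepA c1) (none, n1, 0, true) = (none, n1 + (l.count c1 : Int), 0, true) := by
  rw [foldA_true, h]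

theorem foldA_true_cons (c1 c2 : Int) (l fr : List Int) (h : l.filter (fun x => decide (x ≠ c1)) = c2 :: fr) (n1 : Int) :
    l.foldl (stepA c1) (none, n1, 0, true) = (some c2, n1 + (l.count c1 : Int), (l.count c2 : Int), false) := by
  rw [foldA_true, h]

-- ===== VERDICT (by name: the statement is the Claim_ definition above) =====
theorem solve_spec : Claim_equal_solve := by
  intro A _ hpre
  unfold Spec_solve
  cases A with
  | nil => exact absurd rfl hpre
  | cons c1 rest =>
    simp only [solve, solve_alt, valsB]
    rw [PySem.Set.ofList_cons, discard_ofList]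
    cases hF : rest.filter (fun x => decide (x ≠ c1)) with
    | nil =>
      rw [foldA_true_nil c1 rest hF]
      simp only [PySem.Set.ofList_nil, List.map_cons, List.map_nil, PySem.List.len]
      split_ifs with h1 h2 h2
      · exact absurd h1.1 (by omega)
      · exact absurd h1.1 (by omega)
      · exact absurd h2.1 (by simp)
      · rfl
    | cons c2 fr =>
      rw [foldA_true_cons c1 c2 rest fr hF]
      have hc2 : c2 ≠ c1 := by
        have : c2 ∈ rest.filter (fun x => decide (x ≠ c1)) := by rw [hF]; simp
        simpa using (List.mem_filter.mp this).2
      rw [PySem.Set.ofList_cons, discard_ofList]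
      have hcnt1 : ((c1 :: rest).count c1 : Int) = 1 + (rest.count c1 : Int) := by
        simp [List.count_cons]; push_cast; omega
      have hcnt2 : ((c1 :: rest).count c2 : Int) = (rest.count c2 : Int) := by
        simp [List.count_cons, Ne.symm hc2]
      cases hG : PySem.Set.ofList (fr.filter (fun x => decide (x ≠ c2))) with
      | nil =>
        simp only [List.map_cons, List.map_nil]
        have hall : ∀ x ∈ c1 :: rest, x = c1 ∨ x = c2 := by
          intro x hx
          rcases List.mem_cons.mp hx with rfl | hx
          · exact Or.inl rfl
          by_cases hxc1 : x = c1
          · exact Or.inl hxc1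
          have hxF : x ∈ rest.filter (fun x => decide (x ≠ c1)) :=
            List.mem_filter.mpr ⟨hx, by simpa using hxc1⟩
          rw [hF] at hxF
          rcases List.mem_cons.mp hxF with rfl | hxfr
          · exact Or.inr rfl
          by_cases hxc2 : x = c2
          · exact Or.inr hxc2
          have : x ∈ PySem.Set.ofList (fr.filter (fun x => decide (x ≠ c2))) :=
            (PySem.Set.mem_ofList _ _).mpr (List.mem_filter.mpr ⟨hxfr, by simpa using hxc2⟩)
          rw [hG] at this
          simp at this
        have hsum := count_pair_eq c1 c2 (Ne.symm hc2) (c1 :: rest) hall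
        simp only [List.count_cons_self, List.length_cons] at hsum
        have hc2r : (c1 :: rest).count c2 = rest.count c2 := by
          simp [List.count_cons, Ne.symm hc2]
        rw [hc2r] at hsum
        simp only [PySem.List.len, PySem.List.pyGetD_ofNat', List.getD, List.length_cons,
          List.length_nil, List.getElem?_cons_zero, List.getElem?_cons_succ, Option.getD_some]
        rw [hcnt1, hcnt2]
        by_cases hcc : (1:Int) + (rest.count c1 : Int) = (rest.count c2 : Int)
        · rw [if_pos ⟨hcc, by omega⟩, if_pos ⟨by norm_num, hcc⟩]
        · rw [if_neg (fun hh => hcc hh.1), if_neg (fun hh => hcc hh.2)]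
      | cons c3 tl =>
        simp only [List.map_cons]
        have hc3G : c3 ∈ PySem.Set.ofList (fr.filter (fun x => decide (x ≠ c2))) := by rw [hG]; simp
        have hc3 := (PySem.Set.mem_ofList _ _).mp hc3G
        have hc3fr := (List.mem_filter.mp hc3).1
        have hc3c2 : c3 ≠ c2 := by simpa using (List.mem_filter.mp hc3).2
        have hc3F : c3 ∈ rest.filter (fun x => decide (x ≠ c1)) := by rw [hF]; simp [hc3fr]
        have hc3c1 : c3 ≠ c1 := by simpa using (List.mem_filter.mp hc3F).2
        have hc3A : c3 ∈ c1 :: rest := List.mem_cons_of_mem _ (List.mem_filter.mp hc3F).1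
        have hlt := count_pair_lt c1 c2 c3 (Ne.symm hc2) hc3c1 hc3c2 (c1 :: rest) hc3A
        simp only [List.count_cons_self, List.length_cons] at hlt
        have hc2r : (c1 :: rest).count c2 = rest.count c2 := by
          simp [List.count_cons, Ne.symm hc2]
        rw [hc2r] at hlt
        simp only [PySem.List.len, List.length_cons, List.length_map]
        rw [if_neg (by rintro ⟨-, h2⟩; omega), if_neg (by rintro ⟨h2, -⟩; push_cast at h2; omega)]
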